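-- pv_equiv track=rewrite | github.com/SebastianBruijns/fika-quintic | visual.py | sort_with_noise
-- ===== SOURCE A (Python) =====
-- def sort_with_noise(reference_list, noisy_list):
--     sorted_noisy_list = []
--     used_indices = set()
--
--     for ref in reference_list:
--         # Find the closest element in the noisy list that hasn't been used yet
--         closest_index = None
--         closest_distance = float('inf')
--
--         for i, noisy in enumerate(noisy_list):
--             if i in used_indices:
--                 continue
--
--             distance = abs(ref - noisy)
--             if distance < closest_distance:
--                 closest_distance = distance
--                 closest_index = i
--
--         if closest_index is not None:
--             sorted_noisy_list.append(noisy_list[closest_index])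
--             used_indices.add(closest_index)
--
--     return sorted_noisy_list
-- ===== SOURCE B (Python) =====
-- def sort_with_noise(reference_list, noisy_list):
--     # Shrinking candidate pool: pick the nearest remaining noisy value for each
--     # reference with min() (ties broken by original position), then drop it.
--     remaining = list(enumerate(noisy_list))
--     result = []
--     for ref in reference_list:
--         if not remaining:
--             break
--         best = min(remaining, key=lambda p: (abs(ref - p[1]), p[0]))
--         remaining.remove(best)
--         result.append(best[1])
--     return result
-- ===== Notes on version B (the rewrite author's own statement) =====
-- stated objective: alternative
-- what changed: Replaces the used-index set and full inner scan over noisy_list with a shrinking pool of (index, value) candidates from which each reference picks the nearest one via min() with an (distance, index) key and removes it.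
import Mathlib
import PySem

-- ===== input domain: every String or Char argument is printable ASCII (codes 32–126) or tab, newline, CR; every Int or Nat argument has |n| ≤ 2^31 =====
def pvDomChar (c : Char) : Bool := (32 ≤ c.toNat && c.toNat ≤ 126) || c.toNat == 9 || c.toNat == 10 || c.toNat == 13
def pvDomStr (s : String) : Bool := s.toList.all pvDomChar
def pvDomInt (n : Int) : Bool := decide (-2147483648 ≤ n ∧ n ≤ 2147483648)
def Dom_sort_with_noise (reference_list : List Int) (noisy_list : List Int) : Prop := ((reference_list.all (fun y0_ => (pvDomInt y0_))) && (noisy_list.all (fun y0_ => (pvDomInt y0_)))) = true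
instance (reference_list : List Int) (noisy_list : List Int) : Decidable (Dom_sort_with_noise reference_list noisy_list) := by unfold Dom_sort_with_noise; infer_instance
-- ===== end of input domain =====

-- B replaces A's used-index set + full inner scan by a shrinking pool of (index, value)
-- candidates, picking the nearest remaining one with min() under a (distance, index) key
-- (objective: alternative; same asymptotic cost).

-- ===== PORT A =====
-- A's inner loop state (closest_index, closest_distance) with closest_distance = inf
-- exactly when closest_index is None; ported jointly as Option (index, distance).
def pvInnerA (r : Int) (used : PySem.Set Int) (c : Option (Int × Int)) (p : Int × Int) :
    Option (Int × Int) :=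
  if used.contains p.1 then c
  else
    let d := |r - p.2|
    match c with
    | none => some (p.1, d)
    | some m => if d < m.2 then some (p.1, d) else c

def pvStepA (noisy : List Int) (st : List Int × PySem.Set Int) (r : Int) :
    List Int × PySem.Set Int :=
  match (PySem.List.enumerate noisy).foldl (pvInnerA r st.2) none with
  | none => st
  | some m =>
    -- noisy_list[closest_index]; the index is always in range here
    match PySem.List.pyGet? noisy m.1 with
    | some v => (st.1 ++ [v], st.2.add m.1)
    | none => st

def sort_with_noise (reference_list : List Int) (noisy_list : List Int) : List Int :=
  (reference_list.foldl (pvStepA noisy_list) ([], PySem.Set.empty)).1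

-- ===== PORT B =====
-- the for-loop over reference_list with its early break, as structural recursion
def pvGoB (refs : List Int) (remaining : List (Int × Int)) : List Int :=
  match refs with
  | [] => []
  | r :: rs =>
    if remaining.isEmpty then []
    else
      match PySem.List.min2? remaining (fun p => |r - p.2|) (fun p => p.1) with
      | none => []
      | some best => best.2 :: pvGoB rs ((PySem.List.remove? remaining best).getD remaining)

def sort_with_noise_alt (reference_list : List Int) (noisy_list : List Int) : List Int :=
  pvGoB reference_list (PySem.List.enumerate noisy_list)

-- ===== PRECONDITION & SPEC =====
def Spec_sort_with_noise (reference_list : List Int) (noisy_list : List Int) (out : List Int) : Prop := out = sort_with_noise_alt reference_list noisy_list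
instance (reference_list : List Int) (noisy_list : List Int) (out : List Int) : Decidable (Spec_sort_with_noise reference_list noisy_list out) := by unfold Spec_sort_with_noise; infer_instance

-- ===== CLAIM =====
def Claim_equal_sort_with_noise : Prop := ∀ (reference_list : List Int) (noisy_list : List Int), Dom_sort_with_noise reference_list noisy_list → Spec_sort_with_noise reference_list noisy_list (sort_with_noise reference_list noisy_list)

-- ===== LEMMAS AND PROOFS =====

-- the skip-the-used-indices fold over the full list is the plain fold over the filtered list
theorem pv_foldl_guard (l : List (Int × Int)) (used : PySem.Set Int)
    (f : Option (Int × Int) → (Int × Int) → Option (Int × Int)) (init : Option (Int × Int)) :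
    l.foldl (fun c x => if used.contains x.1 then c else f c x) init
      = (l.filter (fun x => !used.contains x.1)).foldl f init := by
  rw [List.foldl_filter]
  congr 1
  funext c x
  cases h : used.contains x.1 <;> simp

-- indices in an enumeration are strictly increasing
theorem pv_enumerate_pairwise (xs : List Int) (s : Int) :
    (PySem.List.enumerate xs s).Pairwise (fun a b => a.1 < b.1) := by
  have h := PySem.List.map_fst_enumerate xs s
  have hp := PySem.List.pairwise_lt_pyRange_one s (s + xs.length)
  rw [← h] at hp
  exact (List.pairwise_map.mp hp)

-- each enumeration pair indexes its own value
theorem pv_enumerate_getElem (xs : List Int) (s : Nat) (p : Int × Int)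
    (hp : p ∈ PySem.List.enumerate xs (s : Int)) :
    ∃ k : Nat, p.1 = ((s + k : Nat) : Int) ∧ xs[k]? = some p.2 := by
  induction xs generalizing s with
  | nil => simp [PySem.List.enumerate] at hp
  | cons x t ih =>
    rw [PySem.List.enumerate_cons] at hp
    rcases List.mem_cons.mp hp with h | h
    · refine ⟨0, ?_, ?_⟩
      · rw [h]; simp
      · rw [h]; simp
    · have : ((s : Int) + 1) = ((s + 1 : Nat) : Int) := by push_cast; ring
      rw [this] at h
      obtain ⟨k, hk1, hk2⟩ := ih (s + 1) h
      exact ⟨k + 1, by rw [hk1]; congr 1; omega, by simpa using hk2⟩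

theorem pv_enumerate_pyGet? (xs : List Int) (p : Int × Int)
    (hp : p ∈ PySem.List.enumerate xs 0) :
    PySem.List.pyGet? xs p.1 = some p.2 := by
  have h0 : (0 : Int) = ((0 : Nat) : Int) := rfl
  rw [h0] at hp
  obtain ⟨k, hk1, hk2⟩ := pv_enumerate_getElem xs 0 p hp
  rw [hk1]
  simpa [PySem.List.pyGet?_natCast] using hk2


-- proof-side views of the two inner steps
def pvInnerA' (r : Int) (c : Option (Int × Int)) (x : Int × Int) : Option (Int × Int) :=
  let d := |r - x.2|
  match c with
  | none => some (x.1, d)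
  | some m => if d < m.2 then some (x.1, d) else c

def pvMinStep (r : Int) (acc : Option (Int × Int)) (x : Int × Int) : Option (Int × Int) :=
  match acc with
  | none => some x
  | some m =>
    if (decide (|r - x.2| < |r - m.2|) || !decide (|r - m.2| < |r - x.2|) && decide (x.1 < m.1)) = true
    then some x else some m

theorem pv_min2?_eq_foldl (r : Int) (l : List (Int × Int)) :
    PySem.List.min2? l (fun p => |r - p.2|) (fun p => p.1) = l.foldl (pvMinStep r) none := by
  unfold PySem.List.min2?
  congr 1
  funext acc x
  cases acc <;> rfl

theorem pv_foldl_minStep_mem {r : Int} : ∀ (l : List (Int × Int)) (m : Int × Int),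
    ∃ b, l.foldl (pvMinStep r) (some m) = some b ∧ (b = m ∨ b ∈ l) := by
  intro l
  induction l with
  | nil => intro m; exact ⟨m, rfl, Or.inl rfl⟩
  | cons x t ih =>
    intro m
    rw [List.foldl_cons]
    by_cases hc : (decide (|r - x.2| < |r - m.2|) ||
        !decide (|r - m.2| < |r - x.2|) && decide (x.1 < m.1)) = true
    · rw [show pvMinStep r (some m) x = some x from by simp [pvMinStep, hc]]
      obtain ⟨b, hb, hmem⟩ := ih x
      exact ⟨b, hb, Or.inr (hmem.elim (fun h => by simp [h]) (fun h => by simp [h]))⟩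
    · rw [show pvMinStep r (some m) x = some m from by simp [pvMinStep, hc]]
      obtain ⟨b, hb, hmem⟩ := ih m
      exact ⟨b, hb, hmem.elim Or.inl (fun h => Or.inr (List.mem_cons_of_mem _ h))⟩

-- A's strict-< scan over a list with strictly increasing indices simulates
-- B's min-with-(distance, index)-key fold, up to projecting out (index, distance)
theorem pv_inner_sim (r : Int) : ∀ (ps : List (Int × Int)) (acc : Option (Int × Int)),
    ps.Pairwise (fun a b => a.1 < b.1) →
    (∀ m, acc = some m → ∀ x ∈ ps, m.1 < x.1) →
    ps.foldl (pvInnerA' r) (acc.map (fun p => (p.1, |r - p.2|)))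
      = (ps.foldl (pvMinStep r) acc).map (fun p => (p.1, |r - p.2|)) := by
  intro ps
  induction ps with
  | nil => intro acc _ _; rfl
  | cons x t ih =>
    intro acc hpw hacc
    simp only [List.foldl_cons]
    have hstep : pvInnerA' r (acc.map (fun p => (p.1, |r - p.2|))) x
        = (pvMinStep r acc x).map (fun p => (p.1, |r - p.2|)) := by
      cases acc with
      | none => simp [pvInnerA', pvMinStep]
      | some m =>
        have hmx : m.1 < x.1 := hacc m rfl x (by simp)
        have hnx : ¬ x.1 < m.1 := not_lt.mpr (le_of_lt hmx)
        by_cases h : |r - x.2| < |r - m.2| <;>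
          simp [pvInnerA', pvMinStep, h, hnx]
    rw [hstep]
    apply ih (pvMinStep r acc x) (List.pairwise_cons.mp hpw).2
    intro m' hm' y hy
    cases acc with
    | none =>
      have hx : m' = x := (by simpa [pvMinStep] using hm' : x = m').symm
      rw [hx]
      exact (List.pairwise_cons.mp hpw).1 y hy
    | some m =>
      have hx1 : x.1 < y.1 := (List.pairwise_cons.mp hpw).1 y hy
      by_cases hc : (decide (|r - x.2| < |r - m.2|) ||
          !decide (|r - m.2| < |r - x.2|) && decide (x.1 < m.1)) = true
      · have hx : m' = x := (by simpa [pvMinStep, hc] using hm' : x = m').symm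
        rw [hx]; exact hx1
      · have hmm : m' = m := (by simpa [pvMinStep, hc] using hm' : m = m').symm
        rw [hmm]
        exact lt_trans (hacc m rfl x (by simp)) hx1

-- removing the chosen pair from the pool = adding its index to the used set
theorem pv_filter_erase : ∀ (l : List (Int × Int)) (b : Int × Int),
    l.Pairwise (fun a c => a.1 ≠ c.1) → b ∈ l →
    l.filter (fun p => !(p.1 == b.1)) = l.erase b := by
  intro l
  induction l with
  | nil => intro b _ hb; simp at hb
  | cons x t ih =>
    intro b hpw hb
    rcases List.mem_cons.mp hb with h | h
    · subst h
      rw [List.filter_cons, if_neg (by simp), List.erase_cons_head]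
      apply List.filter_eq_self.mpr
      intro y hy
      have hne : b.1 ≠ y.1 := (List.pairwise_cons.mp hpw).1 y hy
      simp [Ne.symm hne]
    · have hx1 : x.1 ≠ b.1 := (List.pairwise_cons.mp hpw).1 b h
      have hxb : (x == b) = false := by
        apply beq_eq_false_iff_ne.mpr
        intro he; exact hx1 (by rw [he])
      rw [List.filter_cons, if_pos (by simp [hx1]), List.erase_cons_tail (by simp [hxb])]
      rw [ih b (List.pairwise_cons.mp hpw).2 h]

theorem pv_goB_nil (refs : List Int) : pvGoB refs [] = [] := by
  cases refs <;> simp [pvGoB]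

-- main loop invariant
theorem pv_main (noisy : List Int) : ∀ (refs : List Int) (out : List Int) (used : PySem.Set Int),
    (refs.foldl (pvStepA noisy) (out, used)).1
      = out ++ pvGoB refs ((PySem.List.enumerate noisy).filter (fun p => !used.contains p.1)) := by
  intro refs
  induction refs with
  | nil => intro out used; simp [pvGoB]
  | cons r rs ih =>
    intro out used
    rw [List.foldl_cons]
    have hpwlt : ((PySem.List.enumerate noisy).filter (fun p => !used.contains p.1)).Pairwise
        (fun a b => a.1 < b.1) := (pv_enumerate_pairwise noisy 0).filter _
    have hsel : (PySem.List.enumerate noisy).foldl (pvInnerA r used) none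
        = (((PySem.List.enumerate noisy).filter (fun p => !used.contains p.1)).foldl
            (pvMinStep r) none).map (fun p => (p.1, |r - p.2|)) := by
      have h1 : (PySem.List.enumerate noisy).foldl (pvInnerA r used) none
          = ((PySem.List.enumerate noisy).filter (fun p => !used.contains p.1)).foldl
              (pvInnerA' r) none := by
        rw [← pv_foldl_guard (PySem.List.enumerate noisy) used (pvInnerA' r) none]
        rfl
      rw [h1]
      exact pv_inner_sim r _ none hpwlt (fun m hm => nomatch hm)
    cases hrem : (PySem.List.enumerate noisy).filter (fun p => !used.contains p.1) with
    | nil =>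
      have hstep : pvStepA noisy (out, used) r = (out, used) := by
        unfold pvStepA
        simp only [hsel, hrem]
        rfl
      rw [hstep, ih out used, hrem]
      simp [pv_goB_nil]
    | cons x t =>
      have hfold : ∃ b, ((x :: t).foldl (pvMinStep r) none) = some b ∧ b ∈ x :: t := by
        rw [List.foldl_cons]
        rw [show pvMinStep r none x = some x from rfl]
        obtain ⟨b, hb, hmem⟩ := pv_foldl_minStep_mem (r := r) t x
        exact ⟨b, hb, hmem.elim (fun h => by simp [h]) (fun h => by simp [h])⟩
      obtain ⟨best, hbest, hbmem⟩ := hfold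
      have hbmem' : best ∈ (PySem.List.enumerate noisy).filter (fun p => !used.contains p.1) := by
        rw [hrem]; exact hbmem
      have hbenum : best ∈ PySem.List.enumerate noisy := List.mem_of_mem_filter hbmem'
      have hbused : used.contains best.1 = false := by
        have := List.of_mem_filter hbmem'
        simpa using this
      have hget : PySem.List.pyGet? noisy best.1 = some best.2 :=
        pv_enumerate_pyGet? noisy best hbenum
      have hstep : pvStepA noisy (out, used) r = (out ++ [best.2], used.add best.1) := by
        unfold pvStepA
        simp only [hsel, hrem, hbest]
        simp [hget]
      have hpwne : (x :: t).Pairwise (fun a c => (a : Int × Int).1 ≠ c.1) := by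
        rw [← hrem]
        exact hpwlt.imp (fun h => ne_of_lt h)
      have hrem' : (PySem.List.enumerate noisy).filter (fun p => !(used.add best.1).contains p.1)
          = (x :: t).erase best := by
        have hadd : used.add best.1 = used ++ [best.1] := by
          simp only [PySem.Set.add, hbused, Bool.false_eq_true, if_false]
        rw [hadd]
        have hsplit : (fun p : Int × Int => !(used ++ [best.1]).contains p.1)
            = fun p => (!(p.1 == best.1)) && !used.contains p.1 := by
          funext p
          by_cases h2 : p.1 = best.1 <;> simp [h2]
        rw [hsplit, ← List.filter_filter, hrem]
        exact pv_filter_erase (x :: t) best hpwne hbmem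
      rw [hstep, ih (out ++ [best.2]) (used.add best.1), hrem']
      have hgo : pvGoB (r :: rs) (x :: t) = best.2 :: pvGoB rs ((x :: t).erase best) := by
        rw [pvGoB]
        rw [if_neg (by simp)]
        rw [pv_min2?_eq_foldl, hbest]
        show best.2 :: pvGoB rs ((PySem.List.remove? (x :: t) best).getD (x :: t))
            = best.2 :: pvGoB rs ((x :: t).erase best)
        rw [PySem.List.remove?_eq_some_erase (x :: t) best hbmem]
        rfl
      rw [hgo]
      simp

-- ===== VERDICT =====
theorem sort_with_noise_spec : Claim_equal_sort_with_noise := by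
  intro refs noisy _
  unfold Spec_sort_with_noise sort_with_noise sort_with_noise_alt
  have h := pv_main noisy refs [] PySem.Set.empty
  simpa [PySem.Set.empty] using h
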